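-- pv_equiv track=rewrite | github.com/kadyyip/advent-of-code-2023 | day11/part1.py | getColsWithNoGalaxies
-- ===== SOURCE A (Python) =====
-- def getColsWithNoGalaxies(grid):
--     cols = []
--     for col in range(len(grid[0])):
--         hasGalaxy = False
--         for row in range(len(grid)):
--             if grid[row][col] == "#":
--                 hasGalaxy = True
--                 break
--         if not hasGalaxy:
--             cols.append(col)
--     return cols
-- ===== SOURCE B (Python) =====
-- def getColsWithNoGalaxies(grid):
--     width = len(grid[0])
--     occupied = set()
--     for row in grid:
--         for c in range(width):
--             if row[c] == "#":
--                 occupied.add(c)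
--     return [c for c in range(width) if c not in occupied]
-- ===== Notes on version B (the rewrite author's own statement) =====
-- stated objective: alternative
-- what changed: B makes one row-major pass building a set of occupied column indices and then emits the complement of that set in one range scan, instead of A's column-major nested scan with an early break per column.
-- outside the precondition, e.g. on getColsWithNoGalaxies(['#', '']): A returns [], B raises IndexError; on getColsWithNoGalaxies([]): A raises IndexError, B raises IndexError
import Mathlib
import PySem

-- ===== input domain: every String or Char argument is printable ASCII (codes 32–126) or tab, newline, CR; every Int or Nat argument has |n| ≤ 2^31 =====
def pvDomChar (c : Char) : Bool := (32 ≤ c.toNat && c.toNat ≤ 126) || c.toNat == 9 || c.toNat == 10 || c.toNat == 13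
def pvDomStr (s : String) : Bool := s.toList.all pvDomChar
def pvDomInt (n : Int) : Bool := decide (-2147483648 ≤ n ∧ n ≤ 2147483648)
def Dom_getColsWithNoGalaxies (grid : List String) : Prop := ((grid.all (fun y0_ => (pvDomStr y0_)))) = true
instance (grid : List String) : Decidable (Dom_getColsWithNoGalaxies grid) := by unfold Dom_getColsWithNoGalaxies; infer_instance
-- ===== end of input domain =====

-- B builds a set of occupied column indices in one row-major pass, then emits the complement;
-- A scans each column over all rows with an early break. Equivalence of the RETURN values is proved.

-- ===== PORT A =====
-- inner loop 'for row in range(len(grid)): if grid[row][col] == "#": … break' — first-match scan over the rows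
def pvHasGalaxy : List String → Int → Bool
  | [], _ => false
  | r :: rs, col => if PySem.Str.pyGet? r col = some '#' then true else pvHasGalaxy rs col

def getColsWithNoGalaxies (grid : List String) : List Int :=
  (PySem.List.pyRange 0 ((PySem.Str.len (grid.headD "")) : Int) 1).foldl
    (fun cols col => if !(pvHasGalaxy grid col) then cols ++ [col] else cols) []

-- ===== PORT B =====
def getColsWithNoGalaxies_alt (grid : List String) : List Int :=
  let width : Int := ((PySem.Str.len (grid.headD "")) : Int)
  let occupied : PySem.Set Int :=
    grid.foldl (fun occ row =>
      (PySem.List.pyRange 0 width 1).foldl (fun occ c =>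
        if PySem.Str.pyGet? row c = some '#' then PySem.Set.add occ c else occ) occ)
      PySem.Set.empty
  (PySem.List.pyRange 0 width 1).filter (fun c => !(PySem.Set.contains occupied c))

-- ===== PRECONDITION & SPEC =====
-- Pre_ excludes the empty grid (grid[0] raises IndexError) and ragged grids with a row shorter
-- than the first row, on which B always raises IndexError and A raises too unless an earlier
-- row's '#' happens to short-circuit its column scan.
def Pre_getColsWithNoGalaxies (grid : List String) : Prop :=
  grid ≠ [] ∧ ∀ s ∈ grid, PySem.Str.len (grid.headD "") ≤ PySem.Str.len s
instance (grid : List String) : Decidable (Pre_getColsWithNoGalaxies grid) := by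
  unfold Pre_getColsWithNoGalaxies; infer_instance

def pvWitness_getColsWithNoGalaxies : List String := ["#..", ".#.", "..."]

def Spec_getColsWithNoGalaxies (grid : List String) (out : List Int) : Prop := out = getColsWithNoGalaxies_alt grid
instance (grid : List String) (out : List Int) : Decidable (Spec_getColsWithNoGalaxies grid out) := by unfold Spec_getColsWithNoGalaxies; infer_instance

-- ===== CLAIM (what is proved, stated in full; the proofs are below) =====
def Claim_equal_getColsWithNoGalaxies : Prop := ∀ (grid : List String), Dom_getColsWithNoGalaxies grid → Pre_getColsWithNoGalaxies grid → Spec_getColsWithNoGalaxies grid (getColsWithNoGalaxies grid)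

-- ===== LEMMAS AND PROOFS =====

-- generic: membership after an 'if hit then add' fold over any index list
lemma pv_mem_foldl_add (P : Int → Prop) [DecidablePred P] (l : List Int) (occ : PySem.Set Int) (c : Int) :
    c ∈ l.foldl (fun o c' => if P c' then PySem.Set.add o c' else o) occ ↔ c ∈ occ ∨ (c ∈ l ∧ P c) := by
  induction l generalizing occ with
  | nil => simp
  | cons a l ih =>
    simp only [List.foldl_cons, ih]
    split_ifs with hPa <;> simp [PySem.Set.mem_add, List.mem_cons] <;> constructor <;>
      rintro (h | h) <;> try tauto
    · rcases h with h | rfl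
      · tauto
      · tauto
    · rcases h with ⟨(rfl | h), hp⟩ <;> tauto

-- the occupied-set fold over the rows, characterised pointwise
lemma pv_mem_occ (rows : List String) (w : Int) (occ : PySem.Set Int) (c : Int) :
    c ∈ rows.foldl (fun occ row =>
        (PySem.List.pyRange 0 w 1).foldl (fun occ c =>
          if PySem.Str.pyGet? row c = some '#' then PySem.Set.add occ c else occ) occ) occ
      ↔ c ∈ occ ∨ (c ∈ PySem.List.pyRange 0 w 1 ∧ ∃ r ∈ rows, PySem.Str.pyGet? r c = some '#') := by
  induction rows generalizing occ with
  | nil => simp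
  | cons r rs ih =>
    simp only [List.foldl_cons, ih,
      pv_mem_foldl_add (fun c' => PySem.Str.pyGet? r c' = some '#')]
    simp only [List.mem_cons]
    constructor
    · rintro ((h | ⟨hm, hp⟩) | ⟨hm, r', hr', hp⟩)
      · exact Or.inl h
      · exact Or.inr ⟨hm, r, Or.inl rfl, hp⟩
      · exact Or.inr ⟨hm, r', Or.inr hr', hp⟩
    · rintro (h | ⟨hm, r', (rfl | hr'), hp⟩)
      · exact Or.inl (Or.inl h)
      · exact Or.inl (Or.inr ⟨hm, hp⟩)
      · exact Or.inr ⟨hm, r', hr', hp⟩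

-- A's break-scan hits iff some row has '#' at that column
lemma pv_hasGalaxy_iff (rows : List String) (c : Int) :
    pvHasGalaxy rows c = true ↔ ∃ r ∈ rows, PySem.Str.pyGet? r c = some '#' := by
  induction rows with
  | nil => simp [pvHasGalaxy]
  | cons r rs ih =>
    simp only [pvHasGalaxy]
    split_ifs with h
    · exact iff_of_true rfl ⟨r, List.mem_cons_self, h⟩
    · rw [ih]
      constructor
      · rintro ⟨r', hr', hp⟩
        exact ⟨r', List.mem_cons_of_mem _ hr', hp⟩
      · rintro ⟨r', hr', hp⟩
        rcases List.mem_cons.mp hr' with rfl | hr''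
        · exact absurd hp h
        · exact ⟨r', hr'', hp⟩

-- ===== VERDICT (by name: the statement is the Claim_ definition above) =====
theorem getColsWithNoGalaxies_spec : Claim_equal_getColsWithNoGalaxies := by
  intro grid _ _
  unfold Spec_getColsWithNoGalaxies getColsWithNoGalaxies getColsWithNoGalaxies_alt
  rw [PySem.List.foldl_append_if_eq_filter]
  simp only [List.nil_append]
  apply List.filter_congr
  intro c hc
  have h2 : pvHasGalaxy grid c = PySem.Set.contains
      (grid.foldl (fun occ row =>
        (PySem.List.pyRange 0 ((PySem.Str.len (grid.headD "")) : Int) 1).foldl (fun occ c =>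
          if PySem.Str.pyGet? row c = some '#' then PySem.Set.add occ c else occ) occ)
        PySem.Set.empty) c := by
    rw [Bool.eq_iff_iff, pv_hasGalaxy_iff, PySem.Set.contains_iff, pv_mem_occ]
    simp only [PySem.Set.empty]
    constructor
    · intro h
      right
      refine ⟨by simpa using hc, h⟩
    · rintro (h | ⟨_, h⟩)
      · simp at h
      · exact h
  rw [h2]
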